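-- pv_equiv track=rewrite | github.com/b-emrekalkan/Algorithm-with-Python | 2-Intermediate_Algorithms/34_Ordering_Odd_Numbers.py | asc
-- ===== SOURCE A (Python) =====
-- def asc(list1):
--     odd = [i for i in list1 if i % 2]
--     odd = sorted(odd)
--
--     k= 0
--     result = []
--
--     for i in list1:
--         if i % 2:
--             result.append(odd[k])
--             k += 1
--         else:
--             result.append(i)
--     return result
-- ===== SOURCE B (Python) =====
-- def asc(list1):
--     # Selection algorithm: repeatedly pull the minimum remaining odd value to the front
--     # odd slot, swapping the displaced odd value back into the vacated cell. No sort call.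
--     work = list(list1)
--     result = []
--     while work:
--         v = work.pop(0)
--         if v % 2 == 0:
--             result.append(v)
--         else:
--             m = min([v] + [x for x in work if x % 2])
--             if m == v:
--                 result.append(v)
--             else:
--                 k = work.index(m)
--                 work[k] = v
--                 result.append(m)
--     return result
-- ===== Notes on version B (the rewrite author's own statement) =====
-- stated objective: alternative
-- what changed: B never calls sorted(): it is a selection algorithm that repeatedly extracts the minimum remaining odd value into the earliest odd slot, swapping the displaced odd value back into the vacated cell, instead of A's sort-the-odds-once-then-reinsert-with-a-counter pass.
import Mathlib
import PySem

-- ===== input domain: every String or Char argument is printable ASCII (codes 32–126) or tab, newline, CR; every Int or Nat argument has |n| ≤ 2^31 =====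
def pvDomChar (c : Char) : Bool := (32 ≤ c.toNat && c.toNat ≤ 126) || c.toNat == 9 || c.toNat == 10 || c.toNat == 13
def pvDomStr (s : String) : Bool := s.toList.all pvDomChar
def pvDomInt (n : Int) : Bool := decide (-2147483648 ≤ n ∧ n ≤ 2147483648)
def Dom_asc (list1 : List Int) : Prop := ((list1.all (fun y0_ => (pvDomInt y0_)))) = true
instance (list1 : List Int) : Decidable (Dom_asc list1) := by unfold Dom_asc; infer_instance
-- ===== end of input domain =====

-- B replaces A's sort-the-odds-then-reinsert pass by a selection algorithm with no sort at all:
-- it repeatedly extracts the minimum remaining odd value into the earliest odd slot, swapping the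
-- displaced odd value back into the vacated cell (alternative algorithm, O(n^2) vs A's O(n log n));
-- neither version mutates its argument.

-- ===== PORT A =====
def asc (list1 : List Int) : List Int :=
  let odd := list1.filter (fun i => PySem.Int.mod i 2 != 0)
  let odd := PySem.List.sorted odd (fun x => x) false
  -- loop state (k, result); odd[k] is always in range here, so the total pyGetD form is exact
  (list1.foldl
    (fun (st : Int × List Int) i =>
      if PySem.Int.mod i 2 != 0 then (st.1 + 1, st.2 ++ [PySem.List.pyGetD odd st.1 0])
      else (st.1, st.2 ++ [i]))
    (0, [])).2

-- ===== PORT B =====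
-- the while loop of Source B: state (work, result); work.pop(0) is the head split of the match
def ascAltLoop (work : List Int) (result : List Int) : List Int :=
  match work with
  | [] => result
  | v :: work' =>
    if PySem.Int.mod v 2 == 0 then ascAltLoop work' (result ++ [v])
    else
      match PySem.List.min? (v :: work'.filter (fun x => PySem.Int.mod x 2 != 0)) (fun x => x) with
      | none => result  -- unreachable: min? of a nonempty list is always some
      | some m =>
        if m = v then ascAltLoop work' (result ++ [v])
        else
          match _h : PySem.List.index? work' m with
          | none => result  -- unreachable: Python's work.index(m) cannot raise here (m ∈ work')
          | some k => ascAltLoop (PySem.List.pySetD work' (k : Int) v) (result ++ [m])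
termination_by work.length
decreasing_by
  · simp
  · simp
  · simp

def asc_alt (list1 : List Int) : List Int := ascAltLoop list1 []

-- ===== PRECONDITION & SPEC =====
def Spec_asc (list1 : List Int) (out : List Int) : Prop := out = asc_alt list1
instance (list1 : List Int) (out : List Int) : Decidable (Spec_asc list1 out) := by unfold Spec_asc; infer_instance

-- ===== CLAIM (what is proved, stated in full; the proofs are below) =====
def Claim_equal_asc : Prop := ∀ (list1 : List Int), Dom_asc list1 → Spec_asc list1 (asc list1)

-- ===== LEMMAS AND PROOFS =====

-- proof-side vocabulary: the truthiness test 'i % 2' of both Pythons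
def pvOdd (i : Int) : Bool := PySem.Int.mod i 2 != 0

-- the sorted odd values of a list
def pvSortOdds (l : List Int) : List Int :=
  PySem.List.sorted (l.filter pvOdd) (fun x => x) false

-- reference "merge the sorted odd values back" function both ports are reduced to
def pvFill : List Int → List Int → List Int
  | [], _ => []
  | x :: xs, os => if pvOdd x then os.headI :: pvFill xs os.tail else x :: pvFill xs os

-- ===== A side: the counter loop is pvFill =====
lemma ascA_loop (odd : List Int) (l : List Int) : ∀ (k : ℕ) (acc : List Int),
    (l.foldl
      (fun (st : Int × List Int) i =>
        if PySem.Int.mod i 2 != 0 then (st.1 + 1, st.2 ++ [PySem.List.pyGetD odd st.1 0])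
        else (st.1, st.2 ++ [i]))
      ((k : Int), acc)).2 = acc ++ pvFill l (odd.drop k) := by
  induction l with
  | nil => intro k acc; simp [pvFill]
  | cons x xs ih =>
    intro k acc
    have hget : PySem.List.pyGetD odd (k : Int) 0 = (odd.drop k).headI := by
      simp only [PySem.List.pyGetD, PySem.List.pyGet?_natCast, ← List.head?_drop]
      cases List.drop k odd <;> rfl
    have hcast : ((k : Int) + 1) = ((k + 1 : ℕ) : Int) := by push_cast; ring
    by_cases hx : pvOdd x
    · have hx' : (PySem.Int.mod x 2 != 0) = true := hx
      simp only [List.foldl_cons, hx', if_pos, hcast, hget]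
      rw [ih (k + 1) (acc ++ [(odd.drop k).headI])]
      simp [pvFill, hx, List.tail_drop]
    · have hx' : (PySem.Int.mod x 2 != 0) = false := by simp [pvOdd] at hx; simp [hx]
      simp only [List.foldl_cons, hx', Bool.false_eq_true, if_false]
      rw [ih k (acc ++ [x])]
      simp [pvFill, hx]

lemma asc_eq_pvFill (l : List Int) : asc l = pvFill l (pvSortOdds l) := by
  have hf : l.filter pvOdd = l.filter (fun i => PySem.Int.mod i 2 != 0) := rfl
  have := ascA_loop
    (PySem.List.sorted (l.filter (fun i => PySem.Int.mod i 2 != 0)) (fun x => x) false) l 0 []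
  simpa [asc, pvSortOdds, hf] using this

-- ===== B side: the selection loop is pvFill too =====

-- pvFill only looks at values through pvOdd at odd cells: lists that agree except for
-- (odd ↔ odd) cell replacements fill identically
def pvR (a b : Int) : Prop := (pvOdd a ∧ pvOdd b) ∨ a = b

lemma pvFill_congr {l₁ l₂ : List Int} (h : List.Forall₂ pvR l₁ l₂) :
    ∀ os : List Int, pvFill l₁ os = pvFill l₂ os := by
  induction h with
  | nil => intro os; rfl
  | @cons a b l₁ l₂ hab _ ih =>
    intro os
    rcases hab with ⟨ha, hb⟩ | rfl
    · simp [pvFill, ha, hb, ih]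
    · by_cases ha : pvOdd a <;> simp [pvFill, ha, ih]

-- the head-selection identity: if v is odd and m is the minimum odd value of v :: rest,
-- then sorted odds of (v :: rest) = m :: sorted odds of (rest with that m replaced by v)
lemma sortOdds_even (v : Int) (rest : List Int) (hv : ¬ pvOdd v) :
    pvSortOdds (v :: rest) = pvSortOdds rest := by
  simp [pvSortOdds, hv]

lemma mem_sortOdds_le (l : List Int) (m : Int)
    (hm : ∀ y ∈ l.filter pvOdd, m ≤ y) : ∀ y ∈ pvSortOdds l, m ≤ y := by
  intro y hy
  exact hm y ((PySem.List.mem_sorted _ _ _ _).1 hy)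

lemma sortOdds_cons_min (v : Int) (rest : List Int) (hv : pvOdd v)
    (hmin : ∀ y ∈ v :: rest.filter pvOdd, v ≤ y) :
    pvSortOdds (v :: rest) = v :: pvSortOdds rest := by
  apply PySem.List.sorted_id_eq_of_perm_of_pairwise
  · have : (v :: rest).filter pvOdd = v :: rest.filter pvOdd := by
      simp [hv]
    rw [this]
    exact List.Perm.cons v (PySem.List.sorted_perm _ _ _)
  · refine List.pairwise_cons.2 ⟨?_, ?_⟩
    · exact mem_sortOdds_le rest v (fun y hy => hmin y (List.mem_cons_of_mem _ hy))
    · exact PySem.List.sorted_pairwise _ _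

lemma set_append_length (pre suf : List Int) (x v : Int) :
    (pre ++ x :: suf).set pre.length v = pre ++ v :: suf := by
  induction pre with
  | nil => rfl
  | cons p ps ih => simp only [List.cons_append, List.length_cons, List.set]; exact congrArg _ ih

lemma sortOdds_swap (v m : Int) (pre suf : List Int) (hv : pvOdd v) (hm : pvOdd m)
    (hmin : ∀ y ∈ v :: (pre ++ m :: suf).filter pvOdd, m ≤ y) :
    pvSortOdds (v :: (pre ++ m :: suf)) = m :: pvSortOdds (pre ++ v :: suf) := by
  have h2 : (pre ++ v :: suf).filter pvOdd
      = pre.filter pvOdd ++ v :: suf.filter pvOdd := by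
    simp [List.filter_append, hv]
  apply PySem.List.sorted_id_eq_of_perm_of_pairwise
  · have h1 : (v :: (pre ++ m :: suf)).filter pvOdd
        = v :: (pre.filter pvOdd ++ m :: suf.filter pvOdd) := by
      simp [List.filter_append, hv, hm]
    rw [h1]
    have p1 : (pvSortOdds (pre ++ v :: suf)).Perm
        (pre.filter pvOdd ++ v :: suf.filter pvOdd) := by
      rw [← h2]; exact PySem.List.sorted_perm _ _ _
    exact (List.Perm.cons m p1).trans
      ((List.Perm.cons m List.perm_middle).trans
        ((List.Perm.swap v m _).trans (List.Perm.cons v List.perm_middle.symm)))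
  · refine List.pairwise_cons.2 ⟨?_, PySem.List.sorted_pairwise _ _⟩
    apply mem_sortOdds_le
    intro y hy
    rw [h2] at hy
    rcases List.mem_append.1 hy with h | h
    · exact hmin y (by
        simp [List.filter_append]
        exact Or.inr (Or.inl ⟨List.mem_of_mem_filter h, List.of_mem_filter h⟩))
    · rcases List.mem_cons.1 h with rfl | h
      · exact hmin y (List.mem_cons_self)
      · exact hmin y (by
          simp [List.filter_append]
          exact Or.inr (Or.inr ⟨Or.inr (List.mem_of_mem_filter h), List.of_mem_filter h⟩))

lemma ascAltLoop_eq (n : ℕ) : ∀ work : List Int, work.length ≤ n → ∀ result : List Int,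
    ascAltLoop work result = result ++ pvFill work (pvSortOdds work) := by
  induction n with
  | zero =>
    intro work hn result
    rw [List.length_eq_zero_iff.1 (Nat.le_zero.1 hn)]
    simp [ascAltLoop, pvFill]
  | succ n ih =>
    intro work hn result
    match work with
    | [] => simp [ascAltLoop, pvFill]
    | v :: work' =>
      have hw' : work'.length ≤ n := by simpa using hn
      rw [ascAltLoop]
      by_cases hv : pvOdd v
      · have hv' : (PySem.Int.mod v 2 == 0) = false := by
          simp [pvOdd] at hv; simp [hv]
        simp only [hv', Bool.false_eq_true, if_false]
        have hfe : work'.filter (fun x => PySem.Int.mod x 2 != 0) = work'.filter pvOdd := rfl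
        rcases hmo : PySem.List.min? (v :: work'.filter (fun x => PySem.Int.mod x 2 != 0))
            (fun x => x) with _ | m
        · exact absurd ((PySem.List.min?_eq_none_iff _ _).1 hmo) (by simp)
        · have hmem : m ∈ v :: work'.filter pvOdd := by
            have := PySem.List.min?_mem hmo; rwa [hfe] at this
          have hmin : ∀ y ∈ v :: work'.filter pvOdd, m ≤ y := by
            intro y hy
            have := PySem.List.min?_isMin hmo y (by rwa [hfe])
            simpa using this
          have hmodd : pvOdd m := by
            rcases List.mem_cons.1 hmem with rfl | h
            · exact hv
            · exact List.of_mem_filter h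
          dsimp only
          by_cases hmv : m = v
          · subst hmv
            rw [if_pos rfl]
            rw [ih work' hw', sortOdds_cons_min m work' hv hmin]
            simp [pvFill, hv]
          · rw [if_neg hmv]
            rcases hk : PySem.List.index? work' m with _ | k
            · exfalso
              have hnm : m ∉ work' := (PySem.List.index?_eq_none_iff _ _).1 hk
              rcases List.mem_cons.1 hmem with rfl | h
              · exact hmv rfl
              · exact hnm (List.mem_of_mem_filter h)
            · obtain ⟨pre, suf, hsplit, hlen, -⟩ := (PySem.List.index?_eq_some_iff _ _ _).1 hk
              have hset : PySem.List.pySetD work' (k : Int) v = pre ++ v :: suf := by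
                rw [PySem.List.pySetD_natCast, hsplit, ← hlen, set_append_length]
              have hlen' : (pre ++ v :: suf).length ≤ n := by
                have : (pre ++ v :: suf).length = work'.length := by simp [hsplit]
                omega
              dsimp only
              rw [hset, ih (pre ++ v :: suf) hlen', hsplit,
                sortOdds_swap v m pre suf hv hmodd (by rw [← hsplit]; exact hmin)]
              have hcongr : pvFill (pre ++ m :: suf) (pvSortOdds (pre ++ v :: suf))
                  = pvFill (pre ++ v :: suf) (pvSortOdds (pre ++ v :: suf)) := by
                apply pvFill_congr
                refine List.rel_append ?_ (List.Forall₂.cons (Or.inl ⟨hmodd, hv⟩) ?_)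
                · exact (List.forall₂_same).2 (fun x _ => Or.inr rfl)
                · exact (List.forall₂_same).2 (fun x _ => Or.inr rfl)
              simp [pvFill, hv, hcongr]
      · have hv' : (PySem.Int.mod v 2 == 0) = true := by
          simp [pvOdd] at hv; simp [hv]
        simp only [hv', if_true]
        rw [ih work' hw', sortOdds_even v work' hv]
        simp [pvFill, hv]

lemma asc_alt_eq_pvFill (l : List Int) : asc_alt l = pvFill l (pvSortOdds l) := by
  simpa [asc_alt] using ascAltLoop_eq l.length l le_rfl []

-- ===== VERDICT (by name: the statement is the Claim_ definition above) =====
theorem asc_spec : Claim_equal_asc := by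
  intro l _
  unfold Spec_asc
  rw [asc_eq_pvFill, asc_alt_eq_pvFill]
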